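-- pv_equiv track=rewrite | github.com/tiagoantao/pygenomics | genomics/popgen/stats/dxy.py | get_n_poses
-- ===== SOURCE A (Python) =====
-- def get_n_poses(seqs):
--     n_poses = set()
--     for seq in seqs:
--         seq_pos = [i for i in range(len(seq)) if seq[i] in ["n", "N"]]
--         n_poses = n_poses.union(seq_pos)
--     n_poses = list(n_poses)
--     n_poses.sort()
--     return n_poses
-- ===== SOURCE B (Python) =====
-- def get_n_poses(seqs):
--     width = max((len(s) for s in seqs), default=0)
--     return [i for i in range(width)
--             if any(i < len(s) and s[i] in "nN" for s in seqs)]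
-- ===== Notes on version B (the rewrite author's own statement) =====
-- stated objective: alternative
-- what changed: Inverts the traversal: instead of scanning each sequence for hits, collecting them in a set and sorting, B iterates over columns 0..max_len-1 and emits a column index directly when any sequence has n/N there, so the output is built in order with no set and no sort.
import Mathlib
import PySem

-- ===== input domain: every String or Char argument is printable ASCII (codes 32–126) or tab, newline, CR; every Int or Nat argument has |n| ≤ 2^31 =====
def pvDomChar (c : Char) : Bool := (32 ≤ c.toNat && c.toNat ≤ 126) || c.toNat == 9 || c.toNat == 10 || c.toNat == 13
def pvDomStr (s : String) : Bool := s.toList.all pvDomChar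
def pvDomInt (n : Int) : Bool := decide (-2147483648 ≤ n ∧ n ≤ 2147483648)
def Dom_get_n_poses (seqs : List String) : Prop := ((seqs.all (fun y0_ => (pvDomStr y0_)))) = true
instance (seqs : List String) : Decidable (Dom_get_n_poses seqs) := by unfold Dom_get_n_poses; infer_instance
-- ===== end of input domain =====

-- B inverts the traversal: it walks columns 0..max_len-1 and emits an index when any
-- sequence has n/N there, building the result in order with no set and no sort (alternative).


-- ===== PORT A =====
-- n_poses = set(); for seq: n_poses |= [i for i in range(len(seq)) if seq[i] in ["n","N"]]; list; sort
def get_n_poses (seqs : List String) : List Int :=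
  let n_poses : PySem.Set Int :=
    seqs.foldl
      (fun acc seq =>
        PySem.Set.union acc
          ((PySem.List.pyRange 0 (PySem.Str.len seq)).filter
            (fun i => decide (PySem.Str.pyGet? seq i = some 'n' ∨ PySem.Str.pyGet? seq i = some 'N'))))
      PySem.Set.empty
  PySem.List.sorted n_poses (fun x => x)

-- ===== PORT B =====
-- s[i] in "nN"
def nnChar (c : Char) : Bool := c == 'n' || c == 'N'

-- width = max((len(s) for s in seqs), default=0);
-- [i for i in range(width) if any(i < len(s) and s[i] in "nN" for s in seqs)]
def get_n_poses_alt (seqs : List String) : List Int :=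
  let width : Int := seqs.foldl (fun w s => max w (PySem.Str.len s)) 0
  (PySem.List.pyRange 0 width).filter
    (fun i => seqs.any (fun s => decide (i < PySem.Str.len s) && (PySem.Str.pyGet? s i).any nnChar))

-- ===== PRECONDITION & SPEC =====
def Spec_get_n_poses (seqs : List String) (out : List Int) : Prop := out = get_n_poses_alt seqs
instance (seqs : List String) (out : List Int) : Decidable (Spec_get_n_poses seqs out) := by unfold Spec_get_n_poses; infer_instance

-- ===== CLAIM (what is proved, stated in full; the proofs are below) =====
def Claim_equal_get_n_poses : Prop := ∀ (seqs : List String), Dom_get_n_poses seqs → Spec_get_n_poses seqs (get_n_poses seqs)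

-- ===== LEMMAS AND PROOFS =====

theorem cond_bridge (s : String) (n : Nat) :
    (decide ((n : Int) < PySem.Str.len s) && (PySem.Str.pyGet? s (n : Int)).any nnChar)
      = (s.toList[n]?).any nnChar := by
  rw [PySem.Str.pyGet?_natCast, PySem.Str.len_eq]
  have hlen : s.toList.length = s.length := by simp
  by_cases h : n < s.toList.length
  · have h' : ((n : Int) < (s.length : Int)) := by rw [← hlen]; exact_mod_cast h
    simp [h', h]
  · have h' : ¬ ((n : Int) < (s.length : Int)) := by rw [← hlen]; exact_mod_cast h
    rw [List.getElem?_eq_none (by omega)]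
    simp [h']

theorem width_mono (seqs : List String) : ∀ (w : Int),
    w ≤ seqs.foldl (fun w s => max w (PySem.Str.len s)) w := by
  induction seqs with
  | nil => simp
  | cons q l ih =>
    intro w
    simp only [List.foldl_cons]
    exact le_trans (le_max_left _ _) (ih _)

theorem width_bound (seqs : List String) : ∀ (w : Int), ∀ s ∈ seqs,
    PySem.Str.len s ≤ seqs.foldl (fun w s => max w (PySem.Str.len s)) w := by
  induction seqs with
  | nil => simp
  | cons q l ih =>
    intro w s hs
    simp only [List.foldl_cons]
    rcases List.mem_cons.mp hs with rfl | hs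
    · exact le_trans (le_max_right _ _) (width_mono l _)
    · exact ih _ s hs

theorem setA_nodup (seqs : List String) : ∀ (acc : PySem.Set Int), acc.Nodup →
    (seqs.foldl
      (fun acc seq =>
        PySem.Set.union acc
          ((PySem.List.pyRange 0 (PySem.Str.len seq)).filter
            (fun i => decide (PySem.Str.pyGet? seq i = some 'n' ∨ PySem.Str.pyGet? seq i = some 'N'))))
      acc).Nodup := by
  induction seqs with
  | nil => intro acc h; simpa using h
  | cons q l ih =>
    intro acc h
    simp only [List.foldl_cons]
    exact ih _ (PySem.Set.nodup_union _ _ h)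

theorem setA_mem (seqs : List String) : ∀ (acc : PySem.Set Int) (x : Int),
    (x ∈ seqs.foldl
      (fun acc seq =>
        PySem.Set.union acc
          ((PySem.List.pyRange 0 (PySem.Str.len seq)).filter
            (fun i => decide (PySem.Str.pyGet? seq i = some 'n' ∨ PySem.Str.pyGet? seq i = some 'N'))))
      acc)
    ↔ (x ∈ acc ∨ ∃ n : Nat, x = (n : Int) ∧ seqs.any (fun s => (s.toList[n]?).any nnChar) = true) := by
  induction seqs with
  | nil => intro acc x; simp
  | cons q l ih =>
    intro acc x
    simp only [List.foldl_cons]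
    rw [ih]
    constructor
    · rintro (hm | ⟨n, rfl, hany⟩)
      · rcases (PySem.Set.mem_union _ _ _).mp hm with hm | hm
        · exact Or.inl hm
        · right
          simp only [List.mem_filter, PySem.List.mem_pyRange_one, PySem.Str.len_eq] at hm
          obtain ⟨⟨h0, hlt⟩, hp⟩ := hm
          refine ⟨x.toNat, by omega, ?_⟩
          have hx : x = ((x.toNat : Nat) : Int) := by omega
          rw [hx] at hp
          rw [PySem.Str.pyGet?_natCast] at hp
          simp only [decide_eq_true_eq] at hp
          simp only [List.any_cons]
          rcases hp with hp | hp <;> simp [hp, nnChar]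
      · exact Or.inr ⟨n, rfl, by simp only [List.any_cons]; simp [hany]⟩
    · rintro (hm | ⟨n, rfl, hany⟩)
      · exact Or.inl ((PySem.Set.mem_union _ _ _).mpr (Or.inl hm))
      · simp only [List.any_cons, Bool.or_eq_true] at hany
        rcases hany with hq | hl
        · left
          refine (PySem.Set.mem_union _ _ _).mpr (Or.inr ?_)
          simp only [List.mem_filter, PySem.List.mem_pyRange_one, PySem.Str.len_eq]
          obtain ⟨c, hc, hnn⟩ : ∃ c, q.toList[n]? = some c ∧ nnChar c = true := by
            cases hcase : q.toList[n]? with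
            | none => rw [hcase] at hq; simp [Option.any] at hq
            | some c => exact ⟨c, rfl, by rw [hcase] at hq; simpa [Option.any] using hq⟩
          have hn : n < q.toList.length := by
            by_contra hge
            rw [List.getElem?_eq_none (by omega)] at hc
            simp at hc
          refine ⟨⟨by positivity, by exact_mod_cast hn⟩, ?_⟩
          rw [PySem.Str.pyGet?_natCast]
          simp only [nnChar, Bool.or_eq_true, beq_iff_eq] at hnn
          rcases hnn with rfl | rfl <;> simp [hc]
        · exact Or.inr ⟨n, rfl, hl⟩

theorem final (seqs : List String) : get_n_poses seqs = get_n_poses_alt seqs := by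
  unfold get_n_poses get_n_poses_alt
  simp only []
  set width := seqs.foldl (fun w s => max w (PySem.Str.len s)) 0 with hwidth
  set S := seqs.foldl
      (fun acc seq =>
        PySem.Set.union acc
          ((PySem.List.pyRange 0 (PySem.Str.len seq)).filter
            (fun i => decide (PySem.Str.pyGet? seq i = some 'n' ∨ PySem.Str.pyGet? seq i = some 'N'))))
      PySem.Set.empty with hS
  have hw0 : (0 : Int) ≤ width := width_mono seqs 0
  have hwb : ∀ s ∈ seqs, PySem.Str.len s ≤ width := fun s hs => width_bound seqs 0 s hs
  set B := (PySem.List.pyRange 0 width).filter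
      (fun i => seqs.any (fun s => decide (i < PySem.Str.len s) && (PySem.Str.pyGet? s i).any nnChar)) with hB
  have hpair : List.Pairwise (fun a b => (fun x : Int => x) a < (fun x : Int => x) b) B := by
    refine List.Pairwise.filter _ ?_
    have hw : width = ((width.toNat : Nat) : Int) := by omega
    rw [hw, PySem.List.pyRange_zero_natCast, List.pairwise_map]
    exact (List.pairwise_lt_range).imp (by intro a b h; simp only []; exact_mod_cast h)
  have hBnodup : B.Nodup := hpair.imp (fun h => ne_of_lt h)
  have hSnodup : S.Nodup := setA_nodup seqs PySem.Set.empty (by simp [PySem.Set.empty])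
  have hmem : ∀ x : Int, x ∈ B ↔ x ∈ S := by
    intro x
    rw [hB, List.mem_filter, PySem.List.mem_pyRange_one, hS, setA_mem seqs PySem.Set.empty x]
    simp only [PySem.Set.empty, List.not_mem_nil, false_or]
    constructor
    · rintro ⟨⟨h0, hlt⟩, hany⟩
      refine ⟨x.toNat, by omega, ?_⟩
      have hx : x = ((x.toNat : Nat) : Int) := by omega
      rw [hx] at hany
      simp only [List.any_eq_true] at hany ⊢
      obtain ⟨s, hs, hc⟩ := hany
      exact ⟨s, hs, by rw [← cond_bridge]; exact hc⟩
    · rintro ⟨n, rfl, hany⟩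
      simp only [List.any_eq_true] at hany
      obtain ⟨s, hs, hc⟩ := hany
      have hn : n < s.toList.length := by
        by_contra hge
        rw [List.getElem?_eq_none (by omega)] at hc
        simp [Option.any] at hc
      have hlt : (n : Int) < width := by
        have := hwb s hs
        rw [PySem.Str.len_eq] at this
        omega
      refine ⟨⟨by positivity, hlt⟩, ?_⟩
      simp only [List.any_eq_true]
      exact ⟨s, hs, by rw [cond_bridge]; exact hc⟩
  have hperm : B.Perm S := (List.perm_ext_iff_of_nodup hBnodup hSnodup).mpr hmem
  exact PySem.List.sorted_eq_of_perm_of_pairwise_lt S B (fun x => x) hperm hpair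

-- ===== VERDICT (by name: the statement is the Claim_ definition above) =====
theorem get_n_poses_spec : Claim_equal_get_n_poses := by
  intro seqs _
  unfold Spec_get_n_poses
  exact final seqs
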